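-- pv_equiv track=rewrite | github.com/Medinz01/pm-agent | src/pm_agent/gitignore_manager.py | _get_managed_section
-- ===== SOURCE A (Python) =====
-- SECTION_HEADER = "# pmagent"
--
-- SECTION_FOOTER = "# end pmagent"
--
-- def _get_managed_section(lines: list[str]) -> tuple[int, int]:
--     """
--     Returns (start_idx, end_idx) of the pmagent-managed section.
--     Returns (-1, -1) if no section found.
--     """
--     start = -1
--     end = -1
--     for i, line in enumerate(lines):
--         if line.strip() == SECTION_HEADER:
--             start = i
--         if line.strip() == SECTION_FOOTER:
--             end = i
--     return start, end
-- ===== SOURCE B (Python) =====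
-- SECTION_HEADER = "# pmagent"
--
-- SECTION_FOOTER = "# end pmagent"
--
--
-- def _last_index(values, target):
--     """Last index of target in values, computed as a closed form over the
--     position of target in the reversed list; -1 if absent."""
--     try:
--         return len(values) - 1 - values[::-1].index(target)
--     except ValueError:
--         return -1
--
--
-- def _get_managed_section(lines: list[str]) -> tuple[int, int]:
--     """Staged passes: strip all lines once, then two independent
--     last-occurrence searches via reversed-list .index()."""
--     stripped = [line.strip() for line in lines]
--     return (_last_index(stripped, SECTION_HEADER),
--             _last_index(stripped, SECTION_FOOTER))
-- ===== Notes on version B (the rewrite author's own statement) =====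
-- stated objective: alternative
-- what changed: Replaces A's single combined forward scan with staged passes: strip every line once, then locate each marker independently as len-1-index(target) in the reversed stripped list.
import Mathlib
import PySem

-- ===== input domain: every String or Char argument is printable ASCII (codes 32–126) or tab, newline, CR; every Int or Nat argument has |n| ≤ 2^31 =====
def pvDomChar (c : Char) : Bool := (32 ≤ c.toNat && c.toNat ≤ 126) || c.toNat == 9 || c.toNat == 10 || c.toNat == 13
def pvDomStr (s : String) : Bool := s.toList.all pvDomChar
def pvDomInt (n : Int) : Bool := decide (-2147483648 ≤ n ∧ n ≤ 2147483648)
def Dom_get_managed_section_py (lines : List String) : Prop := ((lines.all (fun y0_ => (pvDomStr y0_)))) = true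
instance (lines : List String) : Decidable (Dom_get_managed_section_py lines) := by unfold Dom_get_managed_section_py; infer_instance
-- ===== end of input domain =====

-- B replaces A's single combined forward scan by staged passes: strip all lines once,
-- then two independent last-occurrence searches via a reversed-list index lookup
-- (alternative decomposition; same O(n) cost).


-- ===== PORT A =====
-- forward scan over enumerate(lines); later matches overwrite earlier ones
def get_managed_section_py (lines : List String) : Int × Int :=
  (PySem.List.enumerate lines 0).foldl
    (fun (st : Int × Int) (p : Int × String) =>
      let st1 := if PySem.Str.strip p.2 = "# pmagent" then (p.1, st.2) else st
      if PySem.Str.strip p.2 = "# end pmagent" then (st1.1, p.1) else st1)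
    (-1, -1)

-- ===== PORT B =====
-- _last_index: len(values) - 1 - values[::-1].index(target), -1 on ValueError;
-- values[::-1] is values.reverse (PySem.List.slice?_none_none_neg_one),
-- .index with try/except is PySem.List.index? (none = ValueError)
def pvLastIndex (values : List String) (target : String) : Int :=
  match PySem.List.index? values.reverse target with
  | some j => (values.length : Int) - 1 - (j : Int)
  | none => -1

def get_managed_section_py_alt (lines : List String) : Int × Int :=
  let stripped := lines.map PySem.Str.strip
  (pvLastIndex stripped "# pmagent", pvLastIndex stripped "# end pmagent")

-- ===== PRECONDITION & SPEC =====
def Spec_get_managed_section_py (lines : List String) (out : Int × Int) : Prop := out = get_managed_section_py_alt lines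
instance (lines : List String) (out : Int × Int) : Decidable (Spec_get_managed_section_py lines out) := by unfold Spec_get_managed_section_py; infer_instance

-- ===== CLAIM =====
def Claim_equal_get_managed_section_py : Prop := ∀ (lines : List String), Dom_get_managed_section_py lines → Spec_get_managed_section_py lines (get_managed_section_py lines)

-- ===== LEMMAS AND PROOFS =====

-- common spec: index of the last line whose strip equals p, forward accumulator form
def pvLastIdx (p : String) : List String → Int → Int → Int
  | [], _, acc => acc
  | l :: t, i, acc => pvLastIdx p t (i + 1) (if PySem.Str.strip l = p then i else acc)

theorem foldA_eq_pvLastIdx (xs : List String) (k s e : Int) :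
    (PySem.List.enumerate xs k).foldl
      (fun (st : Int × Int) (p : Int × String) =>
        let st1 := if PySem.Str.strip p.2 = "# pmagent" then (p.1, st.2) else st
        if PySem.Str.strip p.2 = "# end pmagent" then (st1.1, p.1) else st1)
      (s, e)
    = (pvLastIdx "# pmagent" xs k s, pvLastIdx "# end pmagent" xs k e) := by
  induction xs generalizing k s e with
  | nil => simp [PySem.List.enumerate_nil, pvLastIdx]
  | cons l t ih =>
    rw [PySem.List.enumerate_cons]
    by_cases hh : PySem.Str.strip l = "# pmagent" <;>
      by_cases hf : PySem.Str.strip l = "# end pmagent" <;>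
        simp [hh, hf, ih, pvLastIdx]

theorem pvLastIndex_shift (p : String) (xs : List String) (k acc : Int) :
    (match PySem.List.index? ((xs.map PySem.Str.strip).reverse) p with
     | some j => k + (xs.length : Int) - 1 - (j : Int)
     | none => acc) = pvLastIdx p xs k acc := by
  induction xs generalizing k acc with
  | nil => simp [PySem.List.index?_eq_idxOf?, pvLastIdx]
  | cons l t ih =>
    have hrev : ((l :: t).map PySem.Str.strip).reverse
        = (t.map PySem.Str.strip).reverse ++ [PySem.Str.strip l] := by simp
    rw [hrev]
    by_cases hmem : p ∈ (t.map PySem.Str.strip).reverse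
    · rw [PySem.List.index?_append_of_mem _ hmem]
      obtain ⟨j, hj⟩ := Option.isSome_iff_exists.mp
        ((PySem.List.index?_isSome_iff _ _).mpr hmem)
      have := ih (k + 1) (if PySem.Str.strip l = p then k else acc)
      rw [hj] at this ⊢
      simp only [pvLastIdx]
      rw [← this]
      simp only [List.length_cons]
      push_cast
      ring
    · have hnone : PySem.List.index? ((t.map PySem.Str.strip).reverse) p = none :=
        (PySem.List.index?_eq_none_iff _ _).mpr hmem
      have htail := ih (k + 1) (if PySem.Str.strip l = p then k else acc)
      rw [hnone] at htail
      by_cases hl : PySem.Str.strip l = p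
      · rw [hl]
        rw [PySem.List.index?_append_singleton_self _ p hmem]
        simp only [pvLastIdx, hl] at htail ⊢
        rw [← htail]
        simp only [List.length_cons, List.length_reverse, List.length_map]
        push_cast
        ring
      · have : PySem.List.index?
            ((t.map PySem.Str.strip).reverse ++ [PySem.Str.strip l]) p = none := by
          rw [PySem.List.index?_eq_none_iff]
          simp only [List.mem_append, List.mem_singleton]
          rintro (h | h)
          · exact hmem h
          · exact hl h.symm
        rw [this]
        simp only [pvLastIdx, if_neg hl] at htail ⊢
        exact htail

theorem pvLastIndex_eq (p : String) (xs : List String) :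
    pvLastIndex (xs.map PySem.Str.strip) p = pvLastIdx p xs 0 (-1) := by
  have h := pvLastIndex_shift p xs 0 (-1)
  simp only [zero_add] at h
  rw [← h]
  unfold pvLastIndex
  simp only [List.length_map]

-- ===== VERDICT =====
theorem get_managed_section_py_spec : Claim_equal_get_managed_section_py := by
  intro lines _
  unfold Spec_get_managed_section_py get_managed_section_py get_managed_section_py_alt
  rw [foldA_eq_pvLastIdx]
  simp only [pvLastIndex_eq]
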